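-- pv_equiv track=rewrite | github.com/ArunNitheesT/Python_Backend | engine.py | get_automation_cost_score
-- ===== SOURCE A (Python) =====
-- def get_automation_cost_score(text):
--     words = [
--         "complex system","advanced ai","deep learning","neural network",
--         "computer vision","multimodal analysis","autonomous system","robotics",
--         "adaptive learning","predictive modeling","behavior analysis",
--         "long term planning","dynamic environment","unstructured environment","high uncertainty"
--     ]
--     return 5 if any(w in text.lower() for w in words) else 2
-- ===== SOURCE B (Python) =====
-- WORDS = (
--     "complex system","advanced ai","deep learning","neural network",
--     "computer vision","multimodal analysis","autonomous system","robotics",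
--     "adaptive learning","predictive modeling","behavior analysis",
--     "long term planning","dynamic environment","unstructured environment","high uncertainty"
-- )
--
-- def get_automation_cost_score(text):
--     t = text.lower()
--     for j in range(len(t)):
--         if t.startswith(WORDS, j):
--             return 5
--     return 2
-- ===== Notes on version B (the rewrite author's own statement) =====
-- stated objective: alternative
-- what changed: B lowers the text once and makes a single left-to-right scan over its positions, testing all 15 keywords with one tuple-startswith per position, instead of A's per-keyword whole-text substring membership tests.
import Mathlib
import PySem

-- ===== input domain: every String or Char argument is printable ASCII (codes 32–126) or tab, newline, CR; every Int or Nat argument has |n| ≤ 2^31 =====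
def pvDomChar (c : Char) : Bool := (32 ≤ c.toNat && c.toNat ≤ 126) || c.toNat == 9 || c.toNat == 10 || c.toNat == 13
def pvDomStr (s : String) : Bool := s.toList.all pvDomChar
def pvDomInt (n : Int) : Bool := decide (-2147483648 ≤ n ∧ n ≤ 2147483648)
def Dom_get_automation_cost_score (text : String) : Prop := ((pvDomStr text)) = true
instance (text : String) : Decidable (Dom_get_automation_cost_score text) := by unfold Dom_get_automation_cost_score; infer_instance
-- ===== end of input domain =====

-- B replaces A's per-keyword whole-text substring tests by a single left-to-right scan over
-- the positions of the lowered text with a startswith test per position (objective: alternative).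

def pvWords : List String :=
  ["complex system","advanced ai","deep learning","neural network",
   "computer vision","multimodal analysis","autonomous system","robotics",
   "adaptive learning","predictive modeling","behavior analysis",
   "long term planning","dynamic environment","unstructured environment","high uncertainty"]

-- ===== PORT A =====
-- 5 if any(w in text.lower() for w in words) else 2
def get_automation_cost_score (text : String) : Int :=
  if pvWords.any (fun w => PySem.Str.isIn w (PySem.Str.lower text)) then 5 else 2

-- ===== PORT B =====
-- t = text.lower(); for j in range(len(t)): if t.startswith(WORDS, j): return 5
-- t.startswith(w, j) with 0 ≤ j ≤ len(t) is exactly 'w is a prefix of t dropped j chars';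
-- the tuple form of startswith is 'any of the words'.
def get_automation_cost_score_alt (text : String) : Int :=
  let t := PySem.Str.lower text
  -- range(len(t)): len(t) is a nonnegative Int, so .toNat is exact
  if (List.range (PySem.Str.len t).toNat).any
      (fun j => pvWords.any (fun w => PySem.Chars.startswith (t.toList.drop j) w.toList))
  then 5 else 2

-- ===== PRECONDITION & SPEC =====
def Spec_get_automation_cost_score (text : String) (out : Int) : Prop := out = get_automation_cost_score_alt text
instance (text : String) (out : Int) : Decidable (Spec_get_automation_cost_score text out) := by unfold Spec_get_automation_cost_score; infer_instance

-- ===== CLAIM (what is proved, stated in full; the proofs are below) =====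
def Claim_equal_get_automation_cost_score : Prop := ∀ (text : String), Dom_get_automation_cost_score text → Spec_get_automation_cost_score text (get_automation_cost_score text)

-- ===== LEMMAS AND PROOFS =====

-- 'w in t' for a nonempty w is 'some position j < len t where w starts'.
theorem pv_isIn_iff_pos (w t : String) (hw : w.toList ≠ []) :
    PySem.Str.isIn w t = true ↔
      ∃ j ∈ List.range (PySem.Str.len t).toNat,
        PySem.Chars.startswith (t.toList.drop j) w.toList = true := by
  rw [PySem.Str.isIn_eq, ← PySem.Chars.exists_prefix_drop_iff_isIn]
  simp only [PySem.Str.len_eq, Int.toNat_natCast]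
  constructor
  · rintro ⟨j, hj⟩
    by_cases hle : j < t.toList.length
    · exact ⟨j, by simpa [List.mem_range, PySem.Str.len] using hle,
        (PySem.Chars.startswith_iff _ _).2 hj⟩
    · exfalso
      have : t.toList.drop j = [] := List.drop_eq_nil_of_le (by omega)
      rw [this] at hj
      exact hw (List.prefix_nil.mp hj)
  · rintro ⟨j, _, hj⟩
    exact ⟨j, (PySem.Chars.startswith_iff _ _).1 hj⟩

-- ===== VERDICT (by name: the statement is the Claim_ definition above) =====
theorem get_automation_cost_score_spec : Claim_equal_get_automation_cost_score := by
  intro text _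
  unfold Spec_get_automation_cost_score get_automation_cost_score get_automation_cost_score_alt
  congr 1
  simp only [List.any_eq_true]
  rw [eq_iff_iff]
  constructor
  · rintro ⟨w, hwmem, hw⟩
    have hne : w.toList ≠ [] := by
      fin_cases hwmem <;> decide
    obtain ⟨j, hjr, hjs⟩ := (pv_isIn_iff_pos w _ hne).1 hw
    exact ⟨j, hjr, w, hwmem, hjs⟩
  · rintro ⟨j, hjr, w, hwmem, hjs⟩
    have hne : w.toList ≠ [] := by
      fin_cases hwmem <;> decide
    exact ⟨w, hwmem, (pv_isIn_iff_pos w _ hne).2 ⟨j, hjr, hjs⟩⟩
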